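-- pv_equiv track=rewrite | github.com/RyanGibb/bifrost | paper/Docker/stt.py | right_justified_line
-- ===== SOURCE A (Python) =====
-- MAX_LINE_LENGTH = 80
--
-- def right_justified_line(text: str, cache, width=MAX_LINE_LENGTH):
--     if len(text) < width:
--         for caption in cache[::-1]:
--             text = caption + " " + text
--             if len(text) > width:
--                 break
--     if len(text) > width:
--         text = text[-width:]
--     else:
--         text = " " * (width - len(text)) + text
--     return text
-- ===== SOURCE B (Python) =====
-- MAX_LINE_LENGTH = 80
--
-- def right_justified_line(text: str, cache, width=MAX_LINE_LENGTH):
--     if len(text) < width and cache: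
--         text = " ".join(cache) + " " + text
--     if len(text) > width:
--         text = text[-width:]
--     else:
--         text = " " * (width - len(text)) + text
--     return text
-- ===== Notes on version B (the rewrite author's own statement) =====
-- stated objective: simpler
-- what changed: Replaces the reversed-iteration prepend loop with early break by a single ' '.join of the whole cache; the final [-width:] slice / left-pad makes the results identical because the loop's early-break string is always a suffix of the full concatenation.
import Mathlib
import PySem

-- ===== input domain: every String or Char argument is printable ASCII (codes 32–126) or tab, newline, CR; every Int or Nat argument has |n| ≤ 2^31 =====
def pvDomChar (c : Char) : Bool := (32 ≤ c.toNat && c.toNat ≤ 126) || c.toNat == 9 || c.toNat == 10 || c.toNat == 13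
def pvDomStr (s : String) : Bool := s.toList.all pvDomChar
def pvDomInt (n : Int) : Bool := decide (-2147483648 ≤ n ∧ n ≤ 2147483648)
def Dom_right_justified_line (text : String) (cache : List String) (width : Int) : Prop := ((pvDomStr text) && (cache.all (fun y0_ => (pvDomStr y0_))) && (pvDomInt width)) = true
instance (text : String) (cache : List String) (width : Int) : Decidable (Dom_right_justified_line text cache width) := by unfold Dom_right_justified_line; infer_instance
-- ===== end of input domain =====

-- B replaces A's reversed prepend loop (with early break) by one " ".join of the whole
-- cache; the shared final [-width:]-slice / left-pad step makes the two results equal.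

-- ===== PORT A =====
-- the shared tail of both Pythons: `if len(text) > width: text = text[-width:] else: text = " "*(width-len(text)) + text`
def rjFit (t : List Char) (w : Int) : List Char :=
  if (t.length : Int) > w then PySem.List.slice t (some (-w)) none
  else PySem.List.pyRepeat [' '] (w - (t.length : Int)) ++ t

-- `for caption in cache[::-1]: text = caption + " " + text; if len(text) > width: break`
def rjLoopA (w : Int) : List (List Char) → List Char → List Char
  | [], t => t
  | c :: rest, t =>
      let t' := c ++ ' ' :: t
      if (t'.length : Int) > w then t' else rjLoopA w rest t'

def right_justified_line (text : String) (cache : List String) (width : Int) : String :=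
  let t := text.toList
  let t1 := if (t.length : Int) < width then rjLoopA width (cache.map String.toList).reverse t else t
  String.ofList (rjFit t1 width)

-- ===== PORT B =====
def right_justified_line_alt (text : String) (cache : List String) (width : Int) : String :=
  let t := text.toList
  let cs := cache.map String.toList
  let t1 := if (t.length : Int) < width && !cs.isEmpty then PySem.Chars.join [' '] cs ++ ' ' :: t else t
  String.ofList (rjFit t1 width)

-- ===== PRECONDITION & SPEC =====
def Spec_right_justified_line (text : String) (cache : List String) (width : Int) (out : String) : Prop := out = right_justified_line_alt text cache width
instance (text : String) (cache : List String) (width : Int) (out : String) : Decidable (Spec_right_justified_line text cache width out) := by unfold Spec_right_justified_line; infer_instance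

-- ===== CLAIM (what is proved, stated in full; the proofs are below) =====
def Claim_equal_right_justified_line : Prop := ∀ (text : String) (cache : List String) (width : Int), Dom_right_justified_line text cache width → Spec_right_justified_line text cache width (right_justified_line text cache width)

-- ===== LEMMAS AND PROOFS =====

-- the full (no-break) concatenation A's loop would build if it never broke
def rjFull : List (List Char) → List Char → List Char
  | [], t => t
  | c :: rest, t => rjFull rest (c ++ ' ' :: t)

theorem rjFull_append_singleton (l : List (List Char)) (c : List Char) (t : List Char) :
    rjFull (l ++ [c]) t = c ++ ' ' :: rjFull l t := by
  induction l generalizing t with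
  | nil => rfl
  | cons d l ih => simpa [rjFull] using ih (d ++ ' ' :: t)

theorem rjFull_suffix (l : List (List Char)) (t : List Char) : t <:+ rjFull l t := by
  induction l generalizing t with
  | nil => exact List.suffix_refl t
  | cons c l ih =>
      exact List.IsSuffix.trans ⟨c ++ [' '], by simp⟩ (ih (c ++ ' ' :: t))

theorem rjFull_reverse_eq_join (c : List Char) (cs : List (List Char)) (t : List Char) :
    rjFull ((c :: cs).reverse) t = PySem.Chars.join [' '] (c :: cs) ++ ' ' :: t := by
  induction cs generalizing c with
  | nil => simp [rjFull, PySem.Chars.join_singleton]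
  | cons d cs ih =>
      have h : (c :: d :: cs).reverse = (d :: cs).reverse ++ [c] := by simp
      rw [h, rjFull_append_singleton, ih, PySem.Chars.join_cons_cons]
      simp

theorem rjLoopA_spec (w : Int) (l : List (List Char)) (t : List Char) :
    rjLoopA w l t = rjFull l t ∨
      (w < ((rjLoopA w l t).length : Int) ∧ rjLoopA w l t <:+ rjFull l t) := by
  induction l generalizing t with
  | nil => exact Or.inl rfl
  | cons c l ih =>
      by_cases h : (((c ++ ' ' :: t).length : Int) > w)
      · refine Or.inr ?_
        simp only [rjLoopA, if_pos h]
        exact ⟨h, rjFull_suffix l (c ++ ' ' :: t)⟩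
      · simp only [rjLoopA, if_neg h]
        exact ih (c ++ ' ' :: t)

theorem rjFit_suffix (r f : List Char) (w : Int) (hsuf : r <:+ f) (hw : 0 < w)
    (hr : w < (r.length : Int)) : rjFit r w = rjFit f w := by
  obtain ⟨p, rfl⟩ := hsuf
  have hf : w < (((p ++ r).length : Int)) := by
    rw [List.length_append]; push_cast; omega
  have hwn : (w.toNat : Int) = w := Int.toNat_of_nonneg (le_of_lt hw)
  have hkr : w.toNat ≤ r.length := by omega
  rw [rjFit, rjFit, if_pos hr, if_pos hf, ← hwn,
      PySem.List.slice_from_neg_natCast r w.toNat (by omega),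
      PySem.List.slice_from_neg_natCast (p ++ r) w.toNat (by omega),
      List.length_append, show p.length + r.length - w.toNat = p.length + (r.length - w.toNat) by omega]
  have h1 : List.drop (p.length + (r.length - w.toNat)) p = [] := List.drop_eq_nil_of_le (by omega)
  rw [List.drop_append, h1]
  simp only [List.nil_append]
  congr 1
  omega

theorem right_justified_line_spec : Claim_equal_right_justified_line := by
  unfold Claim_equal_right_justified_line
  intro text cache width _
  unfold Spec_right_justified_line right_justified_line right_justified_line_alt
  by_cases hlt : ((text.toList.length : Int) < width)
  · have hw : 0 < width := lt_of_le_of_lt (by positivity) hlt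
    have hlt2 : ((text.length : Int) < width) := by simpa using hlt
    cases cache with
    | nil => simp [rjLoopA, hlt2]
    | cons c cs =>
        simp only [List.map_cons, List.isEmpty_cons, Bool.not_false, Bool.and_true,
          decide_eq_true_eq, if_pos hlt]
        rcases rjLoopA_spec width ((c.toList :: cs.map String.toList).reverse) text.toList with h | ⟨hlen, hsuf⟩
        · rw [h, rjFull_reverse_eq_join]
        · rw [rjFit_suffix _ _ _ hsuf hw hlen, rjFull_reverse_eq_join]
  · have hlt2 : ¬ ((text.length : Int) < width) := by simpa using hlt
    simp [hlt2]
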